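-- pv_equiv track=rewrite | github.com/ketkar-atharva/Lazarus | server.py | _compute_overall_risk
-- ===== SOURCE A (Python) =====
-- def _compute_overall_risk(discovered: list, missing_headers: list, open_cors: bool, server_leak: str | None) -> str:
--     severities = {ep["severity"] for ep in discovered}
--     if "CRITICAL" in severities:
--         return "CRITICAL"
--     if "HIGH" in severities or len(missing_headers) >= 4:
--         return "HIGH"
--     if "MEDIUM" in severities or open_cors or missing_headers or server_leak:
--         return "MEDIUM"
--     return "LOW"
-- ===== SOURCE B (Python) =====
-- def _compute_overall_risk(discovered: list, missing_headers: list, open_cors: bool, server_leak: str | None) -> str: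
--     _RANK = {"LOW": 0, "MEDIUM": 1, "HIGH": 2, "CRITICAL": 3}
--     _LEVELS = ["LOW", "MEDIUM", "HIGH", "CRITICAL"]
--     rank = 0
--     for ep in discovered:
--         rank = max(rank, _RANK.get(ep["severity"], 0))
--     if len(missing_headers) >= 4:
--         rank = max(rank, 2)
--     if open_cors or missing_headers or server_leak:
--         rank = max(rank, 1)
--     return _LEVELS[rank]
-- ===== Notes on version B (the rewrite author's own statement) =====
-- stated objective: alternative
-- what changed: Replaces the short-circuit if-cascade over a set of severities by a single rank-and-reduce pass: each severity maps to a numeric rank (unknown -> 0), header/CORS/leak conditions contribute ranks, and the maximum rank indexes the level table.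
import Mathlib
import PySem

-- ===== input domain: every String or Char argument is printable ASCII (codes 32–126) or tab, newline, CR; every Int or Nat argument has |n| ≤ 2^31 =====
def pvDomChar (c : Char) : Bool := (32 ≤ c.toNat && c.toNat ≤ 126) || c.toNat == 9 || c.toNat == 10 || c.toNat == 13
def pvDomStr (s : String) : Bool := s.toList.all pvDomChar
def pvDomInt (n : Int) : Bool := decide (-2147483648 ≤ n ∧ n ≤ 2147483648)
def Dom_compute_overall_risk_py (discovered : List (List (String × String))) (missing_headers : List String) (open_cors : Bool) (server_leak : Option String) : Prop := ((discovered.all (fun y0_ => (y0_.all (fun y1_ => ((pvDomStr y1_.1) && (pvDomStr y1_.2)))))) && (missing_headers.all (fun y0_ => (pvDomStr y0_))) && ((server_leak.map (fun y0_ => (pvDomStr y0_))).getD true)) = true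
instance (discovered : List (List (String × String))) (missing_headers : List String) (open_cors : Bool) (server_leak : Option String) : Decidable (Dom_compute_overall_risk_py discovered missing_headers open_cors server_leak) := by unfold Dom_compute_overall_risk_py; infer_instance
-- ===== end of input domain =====

-- B replaces A's short-circuit if-cascade over a severity set by a single
-- rank-and-reduce pass (max numeric rank indexes a level table); alternative
-- decomposition, same cost. Equivalence proved on Pre_ (every ep has a
-- "severity" key; A raises KeyError otherwise, and so does B).

-- ===== PORT A =====
-- ep["severity"] is total here via getD ""; Pre_ excludes the KeyError inputs.
def pvSev (ep : List (String × String)) : String := ((PySem.Dict.mk ep).get? "severity").getD ""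

def compute_overall_risk_py (discovered : List (List (String × String))) (missing_headers : List String) (open_cors : Bool) (server_leak : Option String) : String :=
  let severities : PySem.Set String := PySem.Set.ofList (discovered.map pvSev)
  if "CRITICAL" ∈ severities then "CRITICAL"
  else if "HIGH" ∈ severities ∨ 4 ≤ missing_headers.length then "HIGH"
  else if "MEDIUM" ∈ severities ∨ open_cors = true ∨ missing_headers ≠ [] ∨ server_leak.getD "" ≠ "" then "MEDIUM"
  else "LOW"

-- ===== PORT B =====
-- _RANK.get(s, 0) on the constant 4-entry dict, transliterated as the key checks
def pvRankOf (s : String) : Nat :=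
  if s = "CRITICAL" then 3 else if s = "HIGH" then 2 else if s = "MEDIUM" then 1 else 0

def pvStep (r : Nat) (ep : List (String × String)) : Nat := max r (pvRankOf (pvSev ep))

def compute_overall_risk_py_alt (discovered : List (List (String × String))) (missing_headers : List String) (open_cors : Bool) (server_leak : Option String) : String :=
  let r0 := discovered.foldl pvStep 0
  let r1 := if 4 ≤ missing_headers.length then max r0 2 else r0
  let r2 := if open_cors || !missing_headers.isEmpty || (server_leak.getD "" ≠ "" : Bool) then max r1 1 else r1
  ["LOW", "MEDIUM", "HIGH", "CRITICAL"].getD r2 "LOW"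

-- ===== PRECONDITION & SPEC =====
-- Pre_ excludes the inputs where some endpoint dict has no "severity" key: there A
-- (and B alike) raises KeyError on ep["severity"].
def Pre_compute_overall_risk_py (discovered : List (List (String × String))) (missing_headers : List String) (open_cors : Bool) (server_leak : Option String) : Prop :=
  discovered.all (fun ep => ((PySem.Dict.mk ep).get? "severity").isSome) = true
instance (discovered : List (List (String × String))) (missing_headers : List String) (open_cors : Bool) (server_leak : Option String) : Decidable (Pre_compute_overall_risk_py discovered missing_headers open_cors server_leak) := by unfold Pre_compute_overall_risk_py; infer_instance

def pvWitness_compute_overall_risk_py : (List (List (String × String))) × List String × Bool × Option String :=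
  ([[("severity", "HIGH"), ("path", "/admin")]], ["X-Frame-Options"], true, some "nginx")

def Spec_compute_overall_risk_py (discovered : List (List (String × String))) (missing_headers : List String) (open_cors : Bool) (server_leak : Option String) (out : String) : Prop := out = compute_overall_risk_py_alt discovered missing_headers open_cors server_leak
instance (discovered : List (List (String × String))) (missing_headers : List String) (open_cors : Bool) (server_leak : Option String) (out : String) : Decidable (Spec_compute_overall_risk_py discovered missing_headers open_cors server_leak out) := by unfold Spec_compute_overall_risk_py; infer_instance

-- ===== CLAIM (what is proved, stated in full; the proofs are below) =====
def Claim_equal_compute_overall_risk_py : Prop := ∀ (discovered : List (List (String × String))) (missing_headers : List String) (open_cors : Bool) (server_leak : Option String), Dom_compute_overall_risk_py discovered missing_headers open_cors server_leak → Pre_compute_overall_risk_py discovered missing_headers open_cors server_leak → Spec_compute_overall_risk_py discovered missing_headers open_cors server_leak (compute_overall_risk_py discovered missing_headers open_cors server_leak)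

-- ===== LEMMAS AND PROOFS =====

theorem pvRankOf_le_three (s : String) : pvRankOf s ≤ 3 := by
  unfold pvRankOf; split_ifs <;> omega

theorem pv_foldl_le {k : Nat} (l : List (List (String × String))) (a : Nat)
    (ha : a ≤ k) (h : ∀ ep ∈ l, pvRankOf (pvSev ep) ≤ k) : l.foldl pvStep a ≤ k := by
  induction l generalizing a with
  | nil => simpa using ha
  | cons x xs ih =>
      simp only [List.foldl_cons]
      exact ih _ (by have := h x (by simp); simp [pvStep]; omega)
        (fun ep hep => h ep (by simp [hep]))

theorem pv_le_foldl {ep : List (String × String)} (l : List (List (String × String))) (a : Nat)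
    (h : ep ∈ l) : pvRankOf (pvSev ep) ≤ l.foldl pvStep a := by
  induction l generalizing a with
  | nil => cases h
  | cons x xs ih =>
      simp only [List.foldl_cons]
      rcases List.mem_cons.mp h with rfl | hmem
      · -- ep is the head; accumulator only grows
        have : pvStep a ep ≥ pvRankOf (pvSev ep) := by simp [pvStep]
        have grow : ∀ (ys : List (List (String × String))) (b c : Nat), b ≤ c →
            ys.foldl pvStep b ≤ ys.foldl pvStep c := by
          intro ys
          induction ys with
          | nil => intro b c hbc; simpa using hbc
          | cons y ys ihy =>
              intro b c hbc
              simp only [List.foldl_cons]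
              exact ihy _ _ (by simp [pvStep]; omega)
        calc pvRankOf (pvSev ep) ≤ xs.foldl pvStep (pvRankOf (pvSev ep)) := by
              have : ∀ (ys : List (List (String × String))) (b : Nat), b ≤ ys.foldl pvStep b := by
                intro ys
                induction ys with
                | nil => intro b; simp
                | cons y ys ihy =>
                    intro b
                    simp only [List.foldl_cons]
                    exact le_trans (by simp [pvStep]) (ihy _)
              exact this xs _
          _ ≤ xs.foldl pvStep (pvStep a ep) := grow xs _ _ (by simp [pvStep])
      · exact ih _ hmem

theorem pv_rank_eq_of_not {ep : List (String × String)} {k : Nat}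
    (h3 : k < 3 → pvSev ep ≠ "CRITICAL") (h2 : k < 2 → pvSev ep ≠ "HIGH")
    (h1 : k < 1 → pvSev ep ≠ "MEDIUM") : pvRankOf (pvSev ep) ≤ k := by
  unfold pvRankOf
  split_ifs with c1 c2 c3
  · by_contra hk; exact h3 (by omega) c1
  · by_contra hk; exact h2 (by omega) c2
  · by_contra hk; exact h1 (by omega) c3
  · omega

-- ===== VERDICT (by name: the statement is the Claim_ definition above) =====
theorem compute_overall_risk_py_spec : Claim_equal_compute_overall_risk_py := by
  intro discovered missing_headers open_cors server_leak _dom _pre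
  unfold Spec_compute_overall_risk_py compute_overall_risk_py compute_overall_risk_py_alt
  simp only [PySem.Set.mem_ofList, List.mem_map]
  -- name the fold result and bound it by case analysis on A's conditions
  by_cases hC : ∃ ep ∈ discovered, pvSev ep = "CRITICAL"
  · obtain ⟨ep, hmem, hval⟩ := hC
    have h3 : (3 : Nat) ≤ discovered.foldl pvStep 0 := by
      have := pv_le_foldl discovered 0 hmem; rw [hval] at this; simpa [pvRankOf] using this
    have h3' : discovered.foldl pvStep 0 ≤ 3 :=
      pv_foldl_le discovered 0 (by omega) (fun e _ => pvRankOf_le_three _)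
    have hr : discovered.foldl pvStep 0 = 3 := by omega
    rw [if_pos ⟨ep, hmem, hval⟩, hr]
    split_ifs <;> rfl
  · rw [if_neg (by simpa using hC)]
    have hle2 : discovered.foldl pvStep 0 ≤ 2 :=
      pv_foldl_le discovered 0 (by omega)
        (fun e he => pv_rank_eq_of_not (fun _ => fun h => hC ⟨e, he, h⟩) (by omega) (by omega))
    by_cases hH : (∃ ep ∈ discovered, pvSev ep = "HIGH") ∨ 4 ≤ missing_headers.length
    · rw [if_pos hH]
      rcases hH with ⟨ep, hmem, hval⟩ | hlen
      · have h2 : (2 : Nat) ≤ discovered.foldl pvStep 0 := by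
          have := pv_le_foldl discovered 0 hmem; rw [hval] at this; simpa [pvRankOf] using this
        have hr : discovered.foldl pvStep 0 = 2 := by omega
        rw [hr]; split_ifs <;> rfl
      · rw [if_pos hlen]
        have : max (discovered.foldl pvStep 0) 2 = 2 := by omega
        rw [this]; split_ifs <;> rfl
    · rw [if_neg hH]
      push_neg at hH
      obtain ⟨hHs, hlen⟩ := hH
      have hle1 : discovered.foldl pvStep 0 ≤ 1 :=
        pv_foldl_le discovered 0 (by omega)
          (fun e he => pv_rank_eq_of_not (fun _ => fun h => hC ⟨e, he, h⟩)
            (fun _ => fun h => hHs e he h) (by omega))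
      rw [if_neg (by omega : ¬ 4 ≤ missing_headers.length)]
      by_cases hM : (∃ ep ∈ discovered, pvSev ep = "MEDIUM") ∨ open_cors = true ∨ missing_headers ≠ [] ∨ server_leak.getD "" ≠ ""
      · rw [if_pos hM]
        rcases hM with ⟨ep, hmem, hval⟩ | hcond
        · have h1 : (1 : Nat) ≤ discovered.foldl pvStep 0 := by
            have := pv_le_foldl discovered 0 hmem; rw [hval] at this; simpa [pvRankOf] using this
          have hr : discovered.foldl pvStep 0 = 1 := by omega
          rw [hr]; split_ifs <;> rfl
        · have hbool : (open_cors || !missing_headers.isEmpty || (decide (server_leak.getD "" ≠ ""))) = true := by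
            rcases hcond with h | h | h
            · simp [h]
            · simp [List.isEmpty_iff, h]
            · simp [h]
          rw [if_pos hbool]
          have : max (discovered.foldl pvStep 0) 1 = 1 := by omega
          rw [this]; rfl
      · rw [if_neg hM]
        push_neg at hM
        obtain ⟨hMs, hoc, hmh, hsl⟩ := hM
        have hle0 : discovered.foldl pvStep 0 ≤ 0 :=
          pv_foldl_le discovered 0 (by omega)
            (fun e he => pv_rank_eq_of_not (fun _ => fun h => hC ⟨e, he, h⟩)
              (fun _ => fun h => hHs e he h) (fun _ => fun h => hMs e he h))
        have hr : discovered.foldl pvStep 0 = 0 := by omega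
        have hbool : (open_cors || !missing_headers.isEmpty || (decide (server_leak.getD "" ≠ ""))) = false := by
          simp [hoc, List.isEmpty_iff, hmh, hsl]
        rw [if_neg (by rw [hbool]; exact Bool.false_ne_true), hr]; rfl
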